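-- pv_equiv track=rewrite | github.com/LuxiaSL/heresiarch | src/heresiarch/tools/map_tool.py | _col_ruler
-- ===== SOURCE A (Python) =====
-- def _col_ruler(start: int, end: int, gutter: int) -> tuple[str, str, str]:
--     """Build a 3-line column ruler header (tens, ones, ticks).
--
--     Returns (tens_line, ones_line, tick_line) with leading gutter space.
--     """
--     pad = " " * gutter
--     tens = []
--     ones = []
--     ticks = []
--     for c in range(start, end):
--         tens.append(str((c // 10) % 10) if c % 10 == 0 else " ")
--         ones.append(str(c % 10))
--         ticks.append("|" if c % 10 == 0 else ("." if c % 5 == 0 else " "))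
--     return (
--         pad + "".join(tens),
--         pad + "".join(ones),
--         pad + "".join(ticks),
--     )
-- ===== SOURCE B (Python) =====
-- def _col_ruler(start: int, end: int, gutter: int) -> tuple[str, str, str]:
--     """Build a 3-line column ruler header (tens, ones, ticks) by tiling
--     fixed periodic patterns and slicing, instead of per-column branching."""
--     pad = " " * gutter
--     n = end - start
--     if n <= 0:
--         return (pad, pad, pad)
--
--     def tile(base, off):
--         reps = (off + n + len(base) - 1) // len(base)
--         return (base * reps)[off:off + n]
--
--     tens_base = "".join(str(d) + " " * 9 for d in range(10))
--     tens = tile(tens_base, start % 100)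
--     ones = tile("0123456789", start % 10)
--     ticks = tile("|    .    ", start % 10)
--     return (pad + tens, pad + ones, pad + ticks)
-- ===== Notes on version B (the rewrite author's own statement) =====
-- stated objective: alternative
-- what changed: Replaces A's per-column loop with its three branches by tiling fixed periodic base patterns (10-char ones/ticks, 100-char tens) and slicing tiled[start%P : start%P + n].
import Mathlib
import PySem

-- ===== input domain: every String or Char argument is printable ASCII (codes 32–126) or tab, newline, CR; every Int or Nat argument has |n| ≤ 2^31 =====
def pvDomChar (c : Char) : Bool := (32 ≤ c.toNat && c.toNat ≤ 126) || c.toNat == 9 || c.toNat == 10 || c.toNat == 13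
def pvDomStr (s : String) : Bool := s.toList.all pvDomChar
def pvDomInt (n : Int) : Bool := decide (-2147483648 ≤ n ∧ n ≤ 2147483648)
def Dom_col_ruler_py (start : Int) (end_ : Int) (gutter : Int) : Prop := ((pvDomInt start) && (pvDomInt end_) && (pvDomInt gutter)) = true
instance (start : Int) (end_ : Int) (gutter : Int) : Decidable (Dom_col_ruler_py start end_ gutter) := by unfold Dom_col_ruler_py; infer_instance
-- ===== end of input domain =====

-- B replaces A's per-column loop with tiling of fixed periodic patterns plus a slice (objective: alternative decomposition, not faster).

-- ===== PORT A =====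
-- per-column loop appending one 1-char string to each of the three lists, then "".join
def col_ruler_py (start : Int) (end_ : Int) (gutter : Int) : String × String × String :=
  let pad : List Char := List.replicate gutter.toNat ' '
  let st := (PySem.List.pyRange start end_ 1).foldl
    (fun (s : List (List Char) × List (List Char) × List (List Char)) c =>
      (s.1 ++ [if PySem.Int.mod c 10 = 0 then PySem.Int.toChars (PySem.Int.mod (PySem.Int.floordiv c 10) 10) else [' ']],
       s.2.1 ++ [PySem.Int.toChars (PySem.Int.mod c 10)],
       s.2.2 ++ [if PySem.Int.mod c 10 = 0 then ['|'] else if PySem.Int.mod c 5 = 0 then ['.'] else [' ']]))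
    ([], [], [])
  (String.ofList (pad ++ PySem.Chars.join [] st.1),
   String.ofList (pad ++ PySem.Chars.join [] st.2.1),
   String.ofList (pad ++ PySem.Chars.join [] st.2.2))

-- ===== PORT B =====
-- tile(base, off) = (base * reps)[off : off + n]
def pvTile (n : Int) (base : List Char) (off : Int) : List Char :=
  let reps := PySem.Int.floordiv (off + n + (base.length : Int) - 1) (base.length : Int)
  PySem.List.slice (PySem.List.pyRepeat base reps) (some off) (some (off + n))

def col_ruler_py_alt (start : Int) (end_ : Int) (gutter : Int) : String × String × String :=
  let pad : List Char := List.replicate gutter.toNat ' '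
  let n := end_ - start
  if n ≤ 0 then (String.ofList pad, String.ofList pad, String.ofList pad)
  else
    -- tens_base = "".join(str(d) + " " * 9 for d in range(10))
    let tensBase := (PySem.List.pyRange 0 10 1).flatMap
      (fun d => PySem.Int.toChars d ++ List.replicate 9 ' ')
    let tens := pvTile n tensBase (PySem.Int.mod start 100)
    let ones := pvTile n "0123456789".toList (PySem.Int.mod start 10)
    let ticks := pvTile n "|    .    ".toList (PySem.Int.mod start 10)
    (String.ofList (pad ++ tens), String.ofList (pad ++ ones), String.ofList (pad ++ ticks))

-- ===== PRECONDITION & SPEC =====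
def Spec_col_ruler_py (start : Int) (end_ : Int) (gutter : Int) (out : String × String × String) : Prop := out = col_ruler_py_alt start end_ gutter
instance (start : Int) (end_ : Int) (gutter : Int) (out : String × String × String) : Decidable (Spec_col_ruler_py start end_ gutter out) := by unfold Spec_col_ruler_py; infer_instance

-- ===== CLAIM (what is proved, stated in full; the proofs are below) =====
def Claim_equal_col_ruler_py : Prop := ∀ (start : Int) (end_ : Int) (gutter : Int), Dom_col_ruler_py start end_ gutter → Spec_col_ruler_py start end_ gutter (col_ruler_py start end_ gutter)

-- ===== LEMMAS AND PROOFS =====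

lemma join_nil_eq_flatten (xs : List (List Char)) : PySem.Chars.join [] xs = xs.flatten := by
  simp only [PySem.Chars.join, List.intercalate]
  induction xs with
  | nil => rfl
  | cons a t ih =>
    cases t with
    | nil => rfl
    | cons b u => simpa using ih

lemma len_flatten_replicate (base : List Char) (r : Nat) :
    (List.replicate r base).flatten.length = r * base.length := by
  induction r with
  | zero => simp
  | succ r ih => simp [List.replicate_succ, ih, Nat.succ_mul, Nat.add_comm]

lemma getElem?_flatten_replicate (base : List Char) (r k : Nat)
    (hk : k < r * base.length) :
    (List.replicate r base).flatten[k]? = base[k % base.length]? := by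
  induction r generalizing k with
  | zero => omega
  | succ r ih =>
    have hb : 0 < base.length := by
      rcases Nat.eq_zero_or_pos base.length with h | h
      · simp [h] at hk
      · exact h
    rw [Nat.succ_mul] at hk
    rw [List.replicate_succ, List.flatten_cons]
    by_cases h : k < base.length
    · rw [List.getElem?_append_left h, Nat.mod_eq_of_lt h]
    · rw [List.getElem?_append_right (Nat.le_of_not_lt h), ih (k - base.length) (by omega)]
      rw [← Nat.mod_eq_sub_mod (Nat.le_of_not_lt h)]

-- pvTile unrolled to a map over List.range
lemma pvTile_eq_map (n : Int) (base : List Char) (off : Int)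
    (hn : 0 < n) (hoff : 0 ≤ off) (hlt : off < (base.length : Int)) :
    pvTile n base off = (List.range n.toNat).map
      (fun i => base[(off.toNat + i) % base.length]!) := by
  obtain ⟨a, rfl⟩ : ∃ a : Nat, off = (a : Int) := ⟨off.toNat, (Int.toNat_of_nonneg hoff).symm⟩
  have hb : 0 < base.length := by exact_mod_cast lt_of_le_of_lt hoff hlt
  have hbz : (0:Int) < (base.length : Int) := by exact_mod_cast hb
  unfold pvTile
  rw [PySem.Int.floordiv_eq_ediv_of_pos hbz]
  set reps : Int := ((a:Int) + n + (base.length : Int) - 1) / (base.length : Int) with hrepsdef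
  have hrpos : 0 ≤ reps := Int.ediv_nonneg (by omega) (by omega)
  have hge : (a:Int) + n ≤ (base.length : Int) * reps := by
    have h1 := Int.mul_ediv_add_emod ((a:Int) + n + (base.length : Int) - 1) (base.length : Int)
    have h2 := Int.emod_lt_of_pos ((a:Int) + n + (base.length : Int) - 1) hbz
    rw [← hrepsdef] at h1
    omega
  have hcast : (base.length : Int) * reps = ((base.length * reps.toNat : Nat) : Int) := by
    push_cast
    rw [Int.toNat_of_nonneg hrpos]
  have hgeN : a + n.toNat ≤ reps.toNat * base.length := by
    rw [Nat.mul_comm]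
    omega
  have hlen : (PySem.List.pyRepeat base reps).length = reps.toNat * base.length := by
    simp only [PySem.List.pyRepeat, len_flatten_replicate]
  rw [show (a:Int) + n = ((a + n.toNat : Nat) : Int) by omega, PySem.List.slice_natCast]
  apply List.ext_getElem
  · simp only [List.length_take, List.length_drop, List.length_map, List.length_range, hlen]
    omega
  · intro i h1 h2
    simp only [List.getElem_take, List.getElem_drop, List.getElem_map, List.getElem_range,
      Int.toNat_natCast]
    have hkb : a + i < reps.toNat * base.length := by
      simp only [List.length_map, List.length_range] at h2
      omega
    have h? : (PySem.List.pyRepeat base reps)[a + i]? = base[(a + i) % base.length]? :=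
      getElem?_flatten_replicate base reps.toNat (a + i) hkb
    rw [getElem!_pos base _ (Nat.mod_lt _ hb)]
    exact Option.some.inj (by rw [← List.getElem?_eq_getElem, ← List.getElem?_eq_getElem, h?])

-- flatten of a map that yields singletons, with the singleton form given pointwise
lemma flatten_map_singleton_of {α : Type} (l : List α) (f : α → List Char) (g : α → Char)
    (h : ∀ x ∈ l, f x = [g x]) : (l.map f).flatten = l.map g := by
  induction l with
  | nil => rfl
  | cons a t ih =>
    simp only [List.map_cons, List.flatten_cons, h a (List.mem_cons_self), List.singleton_append]
    rw [ih (fun x hx => h x (List.mem_cons_of_mem a hx))]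

lemma pyRange_one_eq (a b : Int) :
    PySem.List.pyRange a b 1 = List.map (fun k : Nat => a + (k : Int)) (List.range (b - a).toNat) := by
  rw [PySem.List.pyRange_of_pos a b Int.one_pos]
  split_ifs with h
  · norm_num
  · rw [show (b - a).toNat = 0 by omega]
    rfl

lemma lineA_eq (s : Int) (N : Nat) (f : Int → List Char) (gch : Nat → Char)
    (h : ∀ k : Nat, f (s + (k : Int)) = [gch k]) :
    ((List.map (fun k : Nat => s + (k : Int)) (List.range N)).map f).flatten
      = (List.range N).map gch := by
  rw [List.map_map]
  exact flatten_map_singleton_of _ _ _ (fun k _ => h k)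

-- closed pattern bases (used only in the proofs; the ports carry the terms themselves)
def pvTB : List Char :=
  (PySem.List.pyRange 0 10 1).flatMap (fun d => PySem.Int.toChars d ++ List.replicate 9 ' ')

lemma tens_tab : ∀ m : Nat, m < 100 →
    (if ((m % 10 : Nat) : Int) = 0 then PySem.Int.toChars (((m / 10) % 10 : Nat) : Int) else [' '])
      = [pvTB[m]!] := by decide

lemma ones_tab : ∀ m : Nat, m < 10 →
    PySem.Int.toChars ((m : Nat) : Int) = ["0123456789".toList[m]!] := by decide

lemma ticks_tab : ∀ m : Nat, m < 10 →
    (if ((m : Nat) : Int) = 0 then ['|'] else if ((m % 5 : Nat) : Int) = 0 then ['.'] else [' '])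
      = ["|    .    ".toList[m]!] := by decide

lemma tens_point (s : Int) (k : Nat) :
    (if PySem.Int.mod (s + (k : Int)) 10 = 0
     then PySem.Int.toChars (PySem.Int.mod (PySem.Int.floordiv (s + (k : Int)) 10) 10)
     else [' '])
      = [pvTB[((PySem.Int.mod s 100).toNat + k) % 100]!] := by
  simp only [PySem.Int.mod_eq_emod_of_pos (by norm_num : (0:Int) < 10),
      PySem.Int.floordiv_eq_ediv_of_pos (by norm_num : (0:Int) < 10),
      PySem.Int.mod_eq_emod_of_pos (by norm_num : (0:Int) < 100)]
  have e1 : (s + (k : Int)) % 10 = (((((s % 100).toNat + k) % 100) % 10 : Nat) : Int) := by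
    push_cast; omega
  have e2 : ((s + (k : Int)) / 10) % 10
      = (((((s % 100).toNat + k) % 100) / 10 % 10 : Nat) : Int) := by
    push_cast; omega
  rw [e1, e2]
  exact tens_tab _ (Nat.mod_lt _ (by norm_num))

lemma ones_point (s : Int) (k : Nat) :
    PySem.Int.toChars (PySem.Int.mod (s + (k : Int)) 10)
      = ["0123456789".toList[((PySem.Int.mod s 10).toNat + k) % 10]!] := by
  simp only [PySem.Int.mod_eq_emod_of_pos (by norm_num : (0:Int) < 10)]
  have e1 : (s + (k : Int)) % 10 = ((((s % 10).toNat + k) % 10 : Nat) : Int) := by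
    push_cast; omega
  rw [e1]
  exact ones_tab _ (Nat.mod_lt _ (by norm_num))

lemma ticks_point (s : Int) (k : Nat) :
    (if PySem.Int.mod (s + (k : Int)) 10 = 0 then ['|']
     else if PySem.Int.mod (s + (k : Int)) 5 = 0 then ['.'] else [' '])
      = ["|    .    ".toList[((PySem.Int.mod s 10).toNat + k) % 10]!] := by
  simp only [PySem.Int.mod_eq_emod_of_pos (by norm_num : (0:Int) < 10),
      PySem.Int.mod_eq_emod_of_pos (by norm_num : (0:Int) < 5)]
  have e1 : (s + (k : Int)) % 10 = ((((s % 10).toNat + k) % 10 : Nat) : Int) := by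
    push_cast; omega
  have e3 : (s + (k : Int)) % 5 = ((((s % 10).toNat + k) % 10 % 5 : Nat) : Int) := by
    push_cast; omega
  rw [e1, e3]
  exact ticks_tab _ (Nat.mod_lt _ (by norm_num))

-- ===== VERDICT (by name: the statement is the Claim_ definition above) =====
theorem col_ruler_py_spec : Claim_equal_col_ruler_py := by
  intro s e g _
  unfold Spec_col_ruler_py col_ruler_py col_ruler_py_alt
  dsimp only
  rw [show ((PySem.List.pyRange 0 10 1).flatMap
        (fun d => PySem.Int.toChars d ++ List.replicate 9 ' ')) = pvTB from rfl]
  by_cases hn : e - s ≤ 0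
  · rw [if_pos hn, pyRange_one_eq, show (e - s).toNat = 0 from by omega]
    simp
  · rw [if_neg hn,
        pvTile_eq_map _ _ _ (by omega) (PySem.Int.mod_nonneg s (by norm_num))
          (by have := PySem.Int.mod_lt s (show (0:Int) < 100 by norm_num)
              simpa [show (pvTB.length : Int) = 100 from by decide] using this),
        pvTile_eq_map _ _ _ (by omega) (PySem.Int.mod_nonneg s (by norm_num))
          (by have := PySem.Int.mod_lt s (show (0:Int) < 10 by norm_num)
              simpa using this),
        pvTile_eq_map _ _ _ (by omega) (PySem.Int.mod_nonneg s (by norm_num))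
          (by have := PySem.Int.mod_lt s (show (0:Int) < 10 by norm_num)
              simpa using this),
        show pvTB.length = 100 from by decide,
        show ("0123456789".toList).length = 10 from by decide,
        show ("|    .    ".toList).length = 10 from by decide]
  
    rw [PySem.List.foldl_prod_mk
      (f := fun (acc : List (List Char)) (c : Int) =>
        acc ++ [if PySem.Int.mod c 10 = 0
                then PySem.Int.toChars (PySem.Int.mod (PySem.Int.floordiv c 10) 10) else [' ']])
      (g := fun (acc : List (List Char) × List (List Char)) (c : Int) =>
        (acc.1 ++ [PySem.Int.toChars (PySem.Int.mod c 10)],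
         acc.2 ++ [if PySem.Int.mod c 10 = 0 then ['|']
                   else if PySem.Int.mod c 5 = 0 then ['.'] else [' ']]))]
    rw [PySem.List.foldl_prod_mk
      (f := fun (acc : List (List Char)) (c : Int) =>
        acc ++ [PySem.Int.toChars (PySem.Int.mod c 10)])
      (g := fun (acc : List (List Char)) (c : Int) =>
        acc ++ [if PySem.Int.mod c 10 = 0 then ['|']
                else if PySem.Int.mod c 5 = 0 then ['.'] else [' ']])]
    simp only [PySem.List.foldl_append_singleton_eq_map, List.nil_append, join_nil_eq_flatten,
      pyRange_one_eq]
    refine Prod.ext ?_ (Prod.ext ?_ ?_)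
    · simp only
      congr 1
      congr 1
      exact lineA_eq s _ _ _ (fun k => tens_point s k)
    · simp only
      congr 1
      congr 1
      exact lineA_eq s _ _ _ (fun k => ones_point s k)
    · simp only
      congr 1
      congr 1
      exact lineA_eq s _ _ _ (fun k => ticks_point s k)
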